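-- pv_equiv track=rewrite | github.com/SamoTech/stalker-to-m3u | api/test.py | extract_account
-- ===== SOURCE A (Python) =====
-- def extract_account(profile, account_raw):
--     """Merge profile + account_info into a clean normalized dict."""
--     src = {}
--     if isinstance(profile, dict):
--         src.update(profile)
--     if isinstance(account_raw, dict):
--         src.update(account_raw)
--
--     def pick(*keys):
--         for k in keys:
--             v = src.get(k)
--             if v not in (None, "", 0, "0", "null", "undefined"):
--                 return str(v).strip()
--         return None
--
--     return {
--         k: v for k, v in {
--             "login":           pick("login", "username", "user_login"),
--             "name":            pick("fname", "full_name", "name", "real_name"),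
--             "status":          pick("status", "account_status", "subscriber_status"),
--             "tariff":          pick("tariff_plan", "tariff", "package", "plan"),
--             "start_date":      pick("start_date", "activation_date", "created_at", "reg_date"),
--             "end_date":        pick("end_date", "expire_date", "expiry", "expiry_date", "exp_date"),
--             "phone":           pick("phone", "mobile", "phone_number"),
--             "email":           pick("email", "mail"),
--             "balance":         pick("balance", "credit"),
--             "max_connections": pick("max_connections", "simultaneous_sessions"),
--             "blocked":         pick("blocked", "is_blocked"),
--             "comment":         pick("comment", "note", "notes"),
--             "created":         pick("created", "created_at", "reg_date"),
--             "last_modified":   pick("last_modified", "last_change", "updated_at"),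
--             "timezone":        pick("timezone", "time_zone"),
--             "locale":          pick("locale", "language", "lang"),
--             "stb_type":        pick("stb_type", "device_type"),
--             "serial_number":   pick("sn", "serial", "serial_number"),
--             "isp":             pick("isp", "provider"),
--             "country":         pick("country", "country_code"),
--         }.items() if v is not None
--     }
-- ===== SOURCE B (Python) =====
-- # Inverted-index rewrite: instead of scanning candidate-key lists against the dict
-- # per output field (A's 20 pick() calls), build a reverse index key->[(field, rank)]
-- # once, make ONE pass over the merged source dict keeping the best (lowest-rank)
-- # surviving value per field, then emit the fields in the fixed output order.
-- CANDIDATES = [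
--     ("login",           ("login", "username", "user_login")),
--     ("name",            ("fname", "full_name", "name", "real_name")),
--     ("status",          ("status", "account_status", "subscriber_status")),
--     ("tariff",          ("tariff_plan", "tariff", "package", "plan")),
--     ("start_date",      ("start_date", "activation_date", "created_at", "reg_date")),
--     ("end_date",        ("end_date", "expire_date", "expiry", "expiry_date", "exp_date")),
--     ("phone",           ("phone", "mobile", "phone_number")),
--     ("email",           ("email", "mail")),
--     ("balance",         ("balance", "credit")),
--     ("max_connections", ("max_connections", "simultaneous_sessions")),
--     ("blocked",         ("blocked", "is_blocked")),
--     ("comment",         ("comment", "note", "notes")),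
--     ("created",         ("created", "created_at", "reg_date")),
--     ("last_modified",   ("last_modified", "last_change", "updated_at")),
--     ("timezone",        ("timezone", "time_zone")),
--     ("locale",          ("locale", "language", "lang")),
--     ("stb_type",        ("stb_type", "device_type")),
--     ("serial_number",   ("sn", "serial", "serial_number")),
--     ("isp",             ("isp", "provider")),
--     ("country",         ("country", "country_code")),
-- ]
--
-- FIELDS = [field for field, _ in CANDIDATES]
--
-- REV = {}
-- for field, keys in CANDIDATES:
--     for rank, key in enumerate(keys):
--         REV.setdefault(key, []).append((field, rank))
--
-- _BAD = (None, "", 0, "0", "null", "undefined")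
--
--
-- def extract_account(profile, account_raw):
--     """Merge profile + account_info into a clean normalized dict (reverse-index, one pass)."""
--     src = {}
--     if isinstance(profile, dict):
--         src.update(profile)
--     if isinstance(account_raw, dict):
--         src.update(account_raw)
--
--     best = {}
--     for k, v in src.items():
--         if v in _BAD:
--             continue
--         for field, rank in REV.get(k, ()):
--             cur = best.get(field)
--             if cur is None or rank < cur[0]:
--                 best[field] = (rank, v)
--
--     return {f: str(best[f][1]).strip() for f in FIELDS if f in best}
-- ===== Notes on version B (the rewrite author's own statement) =====
-- stated objective: alternative
-- what changed: Instead of A's 20 per-field pick() scans of candidate keys against the merged dict, B builds a reverse index key->[(field,rank)] once and makes a single pass over the merged source dict, keeping the lowest-rank surviving value per field, then emits the fields in the fixed output order.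
import Mathlib
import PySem

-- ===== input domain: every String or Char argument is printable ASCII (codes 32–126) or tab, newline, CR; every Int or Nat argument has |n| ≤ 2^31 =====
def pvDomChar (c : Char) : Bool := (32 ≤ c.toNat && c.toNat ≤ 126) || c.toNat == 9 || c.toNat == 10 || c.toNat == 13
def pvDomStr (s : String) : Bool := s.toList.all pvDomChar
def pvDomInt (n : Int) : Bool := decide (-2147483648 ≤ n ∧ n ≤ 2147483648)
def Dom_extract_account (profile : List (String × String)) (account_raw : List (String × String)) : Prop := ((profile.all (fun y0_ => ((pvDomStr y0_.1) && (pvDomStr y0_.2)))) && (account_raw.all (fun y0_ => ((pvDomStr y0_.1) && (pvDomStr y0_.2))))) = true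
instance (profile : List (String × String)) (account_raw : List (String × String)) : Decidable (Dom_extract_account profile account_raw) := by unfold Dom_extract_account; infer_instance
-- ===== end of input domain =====

-- B replaces A's 20 per-field pick(...) scans by a reverse index key -> [(field, rank)] and ONE pass
-- over the merged source dict keeping the lowest-rank surviving value per field (alternative algorithm).

-- ===== PORT A =====
-- pick(*keys): scan keys in order, return str(v).strip() for the first value not in
-- (None, "", 0, "0", "null", "undefined"); values here are strings, so only the string rejects apply.
def pvPickA (src : PySem.Dict String String) : List String → Option String
  | [] => none
  | k :: ks =>
      match src.get? k with
      | some v =>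
          if v == "" || v == "0" || v == "null" || v == "undefined" then pvPickA src ks
          else some (PySem.Str.strip v)
      | none => pvPickA src ks

def extract_account (profile : List (String × String)) (account_raw : List (String × String)) : List (String × String) :=
  let src := (PySem.Dict.empty.update profile).update account_raw
  let pairs : List (String × Option String) :=
    [ ("login",           pvPickA src ["login", "username", "user_login"])
    , ("name",            pvPickA src ["fname", "full_name", "name", "real_name"])
    , ("status",          pvPickA src ["status", "account_status", "subscriber_status"])
    , ("tariff",          pvPickA src ["tariff_plan", "tariff", "package", "plan"])
    , ("start_date",      pvPickA src ["start_date", "activation_date", "created_at", "reg_date"])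
    , ("end_date",        pvPickA src ["end_date", "expire_date", "expiry", "expiry_date", "exp_date"])
    , ("phone",           pvPickA src ["phone", "mobile", "phone_number"])
    , ("email",           pvPickA src ["email", "mail"])
    , ("balance",         pvPickA src ["balance", "credit"])
    , ("max_connections", pvPickA src ["max_connections", "simultaneous_sessions"])
    , ("blocked",         pvPickA src ["blocked", "is_blocked"])
    , ("comment",         pvPickA src ["comment", "note", "notes"])
    , ("created",         pvPickA src ["created", "created_at", "reg_date"])
    , ("last_modified",   pvPickA src ["last_modified", "last_change", "updated_at"])
    , ("timezone",        pvPickA src ["timezone", "time_zone"])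
    , ("locale",          pvPickA src ["locale", "language", "lang"])
    , ("stb_type",        pvPickA src ["stb_type", "device_type"])
    , ("serial_number",   pvPickA src ["sn", "serial", "serial_number"])
    , ("isp",             pvPickA src ["isp", "provider"])
    , ("country",         pvPickA src ["country", "country_code"]) ]
  -- the outer dict comprehension: keep entries whose value is not None (the literal keys are distinct)
  pairs.filterMap (fun p => p.2.map (fun v => (p.1, v)))

-- ===== PORT B =====
-- CANDIDATES table of Source B
def pvCANDIDATES : List (String × List String) :=
  [ ("login",           ["login", "username", "user_login"])
  , ("name",            ["fname", "full_name", "name", "real_name"])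
  , ("status",          ["status", "account_status", "subscriber_status"])
  , ("tariff",          ["tariff_plan", "tariff", "package", "plan"])
  , ("start_date",      ["start_date", "activation_date", "created_at", "reg_date"])
  , ("end_date",        ["end_date", "expire_date", "expiry", "expiry_date", "exp_date"])
  , ("phone",           ["phone", "mobile", "phone_number"])
  , ("email",           ["email", "mail"])
  , ("balance",         ["balance", "credit"])
  , ("max_connections", ["max_connections", "simultaneous_sessions"])
  , ("blocked",         ["blocked", "is_blocked"])
  , ("comment",         ["comment", "note", "notes"])
  , ("created",         ["created", "created_at", "reg_date"])
  , ("last_modified",   ["last_modified", "last_change", "updated_at"])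
  , ("timezone",        ["timezone", "time_zone"])
  , ("locale",          ["locale", "language", "lang"])
  , ("stb_type",        ["stb_type", "device_type"])
  , ("serial_number",   ["sn", "serial", "serial_number"])
  , ("isp",             ["isp", "provider"])
  , ("country",         ["country", "country_code"]) ]

-- FIELDS = [field for field, _ in CANDIDATES]
def pvFIELDS : List String := pvCANDIDATES.map (fun e => e.1)

-- REV: for field, keys in CANDIDATES: for rank, key in enumerate(keys): REV.setdefault(key, []).append((field, rank))
def pvREV : PySem.Dict String (List (String × Int)) :=
  pvCANDIDATES.foldl (fun rev e =>
    (PySem.List.enumerate e.2).foldl (fun rev p =>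
      rev.insert p.2 (rev.getD p.2 [] ++ [(e.1, p.1)])) rev) PySem.Dict.empty

def extract_account_alt (profile : List (String × String)) (account_raw : List (String × String)) : List (String × String) :=
  let src := (PySem.Dict.empty.update profile).update account_raw
  -- best: field -> (rank, value); one pass over src.items, keep the lowest rank (first on ties)
  let best : PySem.Dict String (Int × String) :=
    src.items.foldl (fun best kv =>
      if kv.2 == "" || kv.2 == "0" || kv.2 == "null" || kv.2 == "undefined" then best
      else
        (pvREV.getD kv.1 []).foldl (fun best fr =>
          match best.get? fr.1 with
          | none => best.insert fr.1 (fr.2, kv.2)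
          | some cur => if fr.2 < cur.1 then best.insert fr.1 (fr.2, kv.2) else best) best)
      PySem.Dict.empty
  -- {f: str(best[f][1]).strip() for f in FIELDS if f in best}
  pvFIELDS.filterMap (fun f => (best.get? f).map (fun p => (f, PySem.Str.strip p.2)))

-- ===== PRECONDITION & SPEC =====
def Spec_extract_account (profile : List (String × String)) (account_raw : List (String × String)) (out : List (String × String)) : Prop := out = extract_account_alt profile account_raw
instance (profile : List (String × String)) (account_raw : List (String × String)) (out : List (String × String)) : Decidable (Spec_extract_account profile account_raw out) := by unfold Spec_extract_account; infer_instance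

-- ===== CLAIM (what is proved, stated in full; the proofs are below) =====
def Claim_equal_extract_account : Prop := ∀ (profile : List (String × String)) (account_raw : List (String × String)), Dom_extract_account profile account_raw → Spec_extract_account profile account_raw (extract_account profile account_raw)

-- ===== LEMMAS AND PROOFS =====

-- src.get(k) filtered by the sentinel set
def pvGoodGet (src : PySem.Dict String String) (k : String) : Option String :=
  match src.get? k with
  | some v => if v == "" || v == "0" || v == "null" || v == "undefined" then none else some v
  | none => none

-- one best-update step: keep the pair with the smaller rank (the old one on ties)
def pvUpd (cur : Option (Int × String)) (r : Int) (v : String) : Option (Int × String) :=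
  match cur with
  | none => some (r, v)
  | some c => if r < c.1 then some (r, v) else cur

-- first surviving candidate of ks, scanning from rank b
def pvExpect (src : PySem.Dict String String) : List String → Int → Option (Int × String)
  | [], _ => none
  | k :: ks, b =>
      match pvGoodGet src k with
      | some v => some (b, v)
      | none => pvExpect src ks (b + 1)

-- ranks at which key k occurs in candidate list ks
def pvHits (ks : List String) (k : String) : List Int :=
  (PySem.List.enumerate ks).filterMap (fun p => if p.2 = k then some p.1 else none)

-- all surviving (rank, value) candidates of ks, ranks from b
def pvCands (src : PySem.Dict String String) (ks : List String) (b : Int) : List (Int × String) :=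
  (PySem.List.enumerate ks b).filterMap (fun p => (pvGoodGet src p.2).map (fun v => (p.1, v)))

-- "o is a minimum-rank element of S (none iff S is empty)"
def pvMinSpec (S : List (Int × String)) : Option (Int × String) → Prop
  | none => S = []
  | some p => p ∈ S ∧ ∀ q ∈ S, p.1 ≤ q.1

theorem pvPickA_expect (src : PySem.Dict String String) (ks : List String) (b : Int) :
    pvPickA src ks = (pvExpect src ks b).map (fun p => PySem.Str.strip p.2) := by
  induction ks generalizing b with
  | nil => rfl
  | cons k ks ih =>
      cases h : src.get? k with
      | none => simp [pvPickA, pvExpect, pvGoodGet, h, ih (b + 1)]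
      | some v =>
          by_cases hb : (v == "" || v == "0" || v == "null" || v == "undefined") = true
          · simp [pvPickA, pvExpect, pvGoodGet, h, hb, ih (b + 1)]
          · simp [pvPickA, pvExpect, pvGoodGet, h, hb]

theorem pvProjInner (v : String) (L : List (String × Int)) (b : PySem.Dict String (Int × String)) (f : String) :
    (L.foldl (fun best fr =>
        match best.get? fr.1 with
        | none => best.insert fr.1 (fr.2, v)
        | some cur => if fr.2 < cur.1 then best.insert fr.1 (fr.2, v) else best) b).get? f
    = L.foldl (fun cur fr => if fr.1 = f then pvUpd cur fr.2 v else cur) (b.get? f) := by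
  induction L generalizing b with
  | nil => rfl
  | cons fr L ih =>
      simp only [List.foldl_cons]
      rw [ih]
      congr 1
      by_cases hf : fr.1 = f
      · subst hf
        cases h : b.get? fr.1 with
        | none => simp [pvUpd]
        | some cur =>
            by_cases hlt : fr.2 < cur.1
            · simp [pvUpd, hlt]
            · simp [h, pvUpd, hlt]
      · cases h : b.get? fr.1 with
        | none => simp [hf, PySem.Dict.get?_insert, Ne.symm hf]
        | some cur =>
            by_cases hlt : fr.2 < cur.1
            · simp [hf, hlt, PySem.Dict.get?_insert, Ne.symm hf]
            · simp [hf, hlt]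

theorem pvProjOuter (L : List (String × String)) (b : PySem.Dict String (Int × String)) (f : String) :
    (L.foldl (fun best kv =>
        if kv.2 == "" || kv.2 == "0" || kv.2 == "null" || kv.2 == "undefined" then best
        else
          (pvREV.getD kv.1 []).foldl (fun best fr =>
            match best.get? fr.1 with
            | none => best.insert fr.1 (fr.2, kv.2)
            | some cur => if fr.2 < cur.1 then best.insert fr.1 (fr.2, kv.2) else best) best) b).get? f
    = L.foldl (fun cur kv =>
        if kv.2 == "" || kv.2 == "0" || kv.2 == "null" || kv.2 == "undefined" then cur
        else (pvREV.getD kv.1 []).foldl (fun cur fr => if fr.1 = f then pvUpd cur fr.2 kv.2 else cur) cur)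
        (b.get? f) := by
  induction L generalizing b with
  | nil => rfl
  | cons kv L ih =>
      simp only [List.foldl_cons]
      rw [ih]
      by_cases hb : (kv.2 == "" || kv.2 == "0" || kv.2 == "null" || kv.2 == "undefined") = true
      · simp [hb]
      · simp only [hb, if_false, Bool.false_eq_true]
        rw [pvProjInner]

theorem pvRevInner (f : String) (es : List (Int × String)) (rev : PySem.Dict String (List (String × Int))) (k : String) :
    (es.foldl (fun rev p => rev.insert p.2 (rev.getD p.2 [] ++ [(f, p.1)])) rev).getD k []
    = rev.getD k [] ++ es.filterMap (fun p => if p.2 = k then some (f, p.1) else none) := by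
  induction es generalizing rev with
  | nil => simp
  | cons p es ih =>
      simp only [List.foldl_cons, List.filterMap_cons]
      rw [ih]
      by_cases hk : p.2 = k
      · subst hk
        rw [PySem.Dict.getD_insert]
        simp
      · rw [PySem.Dict.getD_insert]
        simp [Ne.symm hk, hk]

theorem pvRevOuter (spec : List (String × List String)) (rev : PySem.Dict String (List (String × Int))) (k : String) :
    (spec.foldl (fun rev e =>
        (PySem.List.enumerate e.2).foldl (fun rev p =>
          rev.insert p.2 (rev.getD p.2 [] ++ [(e.1, p.1)])) rev) rev).getD k []
    = rev.getD k [] ++ spec.flatMap (fun e =>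
        (PySem.List.enumerate e.2).filterMap (fun p => if p.2 = k then some (e.1, p.1) else none)) := by
  induction spec generalizing rev with
  | nil => simp
  | cons e spec ih =>
      simp only [List.foldl_cons, List.flatMap_cons]
      rw [ih, pvRevInner]
      simp [List.append_assoc]

theorem pvRevGetD (k : String) :
    pvREV.getD k []
    = pvCANDIDATES.flatMap (fun e =>
        (PySem.List.enumerate e.2).filterMap (fun p => if p.2 = k then some (e.1, p.1) else none)) := by
  have := pvRevOuter pvCANDIDATES PySem.Dict.empty k
  simpa [pvREV] using this

theorem pvMemBlockFst (g k : String) (es : List (Int × String)) (fr : String × Int)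
    (h : fr ∈ es.filterMap (fun p => if p.2 = k then some (g, p.1) else none)) : fr.1 = g := by
  rcases List.mem_filterMap.mp h with ⟨p, _, hp⟩
  by_cases hk : p.2 = k
  · simp [hk] at hp; rw [← hp]
  · simp [hk] at hp

theorem pvFilterBlock (f g k : String) (es : List (Int × String)) :
    (es.filterMap (fun p => if p.2 = k then some (g, p.1) else none)).filter (fun fr => decide (fr.1 = f))
    = if g = f then es.filterMap (fun p => if p.2 = k then some (g, p.1) else none) else [] := by
  by_cases hg : g = f
  · subst hg
    rw [if_pos rfl]
    apply List.filter_eq_self.mpr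
    intro fr hfr
    simp [pvMemBlockFst g k es fr hfr]
  · rw [if_neg hg]
    apply List.filter_eq_nil_iff.mpr
    intro fr hfr
    simp [pvMemBlockFst g k es fr hfr, hg]

theorem pvBlockEqHitsMap (g k : String) (ks : List String) :
    (PySem.List.enumerate ks).filterMap (fun p => if p.2 = k then some (g, p.1) else none)
    = (pvHits ks k).map (fun r => (g, r)) := by
  unfold pvHits
  rw [List.map_filterMap]
  apply List.filterMap_congr
  intro p _
  by_cases hk : p.2 = k <;> simp [hk]

theorem pvFlatMapFilterSingle (spec : List (String × List String)) (hnd : (spec.map (fun e => e.1)).Nodup)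
    (e : String × List String) (he : e ∈ spec) (k : String) :
    (spec.flatMap (fun e' =>
        (PySem.List.enumerate e'.2).filterMap (fun p => if p.2 = k then some (e'.1, p.1) else none))).filter
      (fun fr => decide (fr.1 = e.1))
    = (pvHits e.2 k).map (fun r => (e.1, r)) := by
  induction spec with
  | nil => cases he
  | cons e' spec ih =>
      simp only [List.map_cons, List.nodup_cons] at hnd
      simp only [List.flatMap_cons, List.filter_append]
      by_cases hf : e'.1 = e.1
      · have hee : e = e' := by
          rcases List.mem_cons.mp he with he | he
          · exact he
          · exact absurd (hf ▸ List.mem_map_of_mem (f := fun e => e.1) he) hnd.1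
        subst hee
        rw [pvFilterBlock e.1 e.1 k, if_pos rfl, pvBlockEqHitsMap]
        have hrest : (spec.flatMap (fun e' =>
            (PySem.List.enumerate e'.2).filterMap (fun p => if p.2 = k then some (e'.1, p.1) else none))).filter
            (fun fr => decide (fr.1 = e.1)) = [] := by
          apply List.filter_eq_nil_iff.mpr
          intro fr hfr
          rcases List.mem_flatMap.mp hfr with ⟨e'', he'', hmem⟩
          have := pvMemBlockFst e''.1 k (PySem.List.enumerate e''.2) fr hmem
          have hne : e''.1 ≠ e.1 := fun hcon =>
            hnd.1 (hcon ▸ List.mem_map_of_mem (f := fun e => e.1) he'')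
          simp [this, hne]
        rw [hrest, List.append_nil]
      · rw [pvFilterBlock e.1 e'.1 k, if_neg hf, List.nil_append]
        have he2 : e ∈ spec := by
          rcases List.mem_cons.mp he with he | he
          · exact absurd (congrArg (fun e => e.1) he).symm hf
          · exact he
        exact ih hnd.2 he2

theorem pvOuterToC (bad : String → Bool) (hits : String → List Int) (L : List (String × String)) (cur : Option (Int × String)) :
    L.foldl (fun cur kv =>
        if bad kv.2 then cur
        else (hits kv.1).foldl (fun cur r => pvUpd cur r kv.2) cur) cur
    = (L.flatMap (fun kv => if bad kv.2 then [] else (hits kv.1).map (fun r => (r, kv.2)))).foldl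
        (fun cur p => pvUpd cur p.1 p.2) cur := by
  rw [List.foldl_flatMap]
  apply PySem.List.foldl_congr_mem
  intro cur kv _
  by_cases hb : bad kv.2
  · simp [hb]
  · simp only [hb, if_false, Bool.false_eq_true]
    rw [List.foldl_map]

theorem pvUpdCases (cur : Option (Int × String)) (q : Int × String) :
    ∃ u, pvUpd cur q.1 q.2 = some u ∧ (u = q ∨ cur = some u) ∧ u.1 ≤ q.1 ∧
      (∀ c, cur = some c → u.1 ≤ c.1) := by
  cases cur with
  | none =>
      exact ⟨q, by simp [pvUpd], Or.inl rfl, le_refl _, by intro c h; cases h⟩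
  | some c =>
      by_cases hlt : q.1 < c.1
      · refine ⟨q, by simp [pvUpd, hlt], Or.inl rfl, le_refl _, ?_⟩
        intro c' h; injection h with h; exact h ▸ le_of_lt hlt
      · refine ⟨c, by simp [pvUpd, hlt], Or.inr rfl, not_lt.mp hlt, ?_⟩
        intro c' h; injection h with h; exact h ▸ le_refl _

theorem pvFoldlUpdMinSpec (C : List (Int × String)) (cur : Option (Int × String)) :
    pvMinSpec (cur.toList ++ C) (C.foldl (fun cur p => pvUpd cur p.1 p.2) cur) := by
  induction C generalizing cur with
  | nil =>
      cases cur with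
      | none => simp [pvMinSpec]
      | some p => simp [pvMinSpec]
  | cons q C ih =>
      obtain ⟨u, hu, hub, hur, huc⟩ := pvUpdCases cur q
      rw [List.foldl_cons, hu]
      have h := ih (some u)
      cases hres : C.foldl (fun cur p => pvUpd cur p.1 p.2) (some u) with
      | none => rw [hres] at h; simp [pvMinSpec] at h
      | some p =>
          rw [hres] at h
          simp only [pvMinSpec, Option.toList_some, List.singleton_append, List.mem_cons] at h
          obtain ⟨hp, hmin⟩ := h
          simp only [pvMinSpec]
          constructor
          · rcases hp with hp | hp
            · subst hp
              rcases hub with h1 | h1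
              · exact List.mem_append_right _ (h1 ▸ List.mem_cons_self)
              · exact List.mem_append_left _ (by simp [h1])
            · exact List.mem_append_right _ (List.mem_cons_of_mem _ hp)
          · intro r hr
            have hpu : p.1 ≤ u.1 := hmin u (Or.inl rfl)
            rcases List.mem_append.mp hr with hr | hr
            · cases hc : cur with
              | none => rw [hc] at hr; simp at hr
              | some c =>
                  rw [hc] at hr
                  simp only [Option.toList_some, List.mem_singleton] at hr
                  subst hr
                  exact hpu.trans (huc r hc)
            · rcases List.mem_cons.mp hr with hr | hr
              · subst hr; exact hpu.trans hur
              · exact hmin r (Or.inr hr)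

theorem pvMemCandsIff (src : PySem.Dict String String) (ks : List String) (p : Int × String) :
    p ∈ pvCands src ks 0 ↔ ∃ i : Nat, ∃ h : i < ks.length, (i : Int) = p.1 ∧ pvGoodGet src ks[i] = some p.2 := by
  unfold pvCands
  rw [List.mem_filterMap]
  constructor
  · rintro ⟨q, hq, hmap⟩
    rcases (PySem.List.mem_enumerate_iff ks 0 q).mp hq with ⟨i, hi, rfl⟩
    cases hg : pvGoodGet src ks[i] with
    | none => rw [hg] at hmap; cases hmap
    | some v =>
        rw [hg] at hmap
        simp only [Option.map_some, Option.some.injEq] at hmap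
        subst hmap
        exact ⟨i, hi, by simp, by simpa using hg⟩
  · rintro ⟨i, hi, hfst, hg⟩
    refine ⟨((0 : Int) + (i : Int), ks[i]), (PySem.List.mem_enumerate_iff ks 0 _).mpr ⟨i, hi, rfl⟩, ?_⟩
    have hpe : ((0 : Int) + (i : Int), p.2) = p := Prod.ext (by simpa using hfst) rfl
    rw [hg]
    simpa using hpe

theorem pvGoodGetIff (src : PySem.Dict String String) (k v : String) :
    pvGoodGet src k = some v ↔ src.get? k = some v ∧ (v == "" || v == "0" || v == "null" || v == "undefined") = false := by
  unfold pvGoodGet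
  cases hget : src.get? k with
  | none => simp
  | some w =>
      by_cases hb : (w == "" || w == "0" || w == "null" || w == "undefined") = true
      · simp only [hb, if_pos]
        constructor
        · intro h; cases h
        · rintro ⟨hw, hbad⟩
          injection hw with hw; subst hw; rw [hb] at hbad; cases hbad
      · simp only [hb, Bool.false_eq_true, if_false]
        constructor
        · intro h; injection h with h; subst h; simpa using hb
        · rintro ⟨hw, _⟩; injection hw with hw; rw [hw]

theorem pvMemCIff (src : PySem.Dict String String) (hs : src.keys.Nodup) (ks : List String) (p : Int × String) :
    p ∈ src.items.flatMap (fun kv =>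
        if kv.2 == "" || kv.2 == "0" || kv.2 == "null" || kv.2 == "undefined" then []
        else (pvHits ks kv.1).map (fun r => (r, kv.2)))
    ↔ p ∈ pvCands src ks 0 := by
  rw [pvMemCandsIff, List.mem_flatMap]
  constructor
  · rintro ⟨kv, hkv, hp⟩
    by_cases hb : (kv.2 == "" || kv.2 == "0" || kv.2 == "null" || kv.2 == "undefined") = true
    · simp [hb] at hp
    · simp only [hb, if_false, Bool.false_eq_true, List.mem_map] at hp
      rcases hp with ⟨r, hr, rfl⟩
      unfold pvHits at hr
      rcases List.mem_filterMap.mp hr with ⟨q, hq, hmap⟩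
      rcases (PySem.List.mem_enumerate_iff ks 0 q).mp hq with ⟨i, hi, rfl⟩
      by_cases hk : ks[i] = kv.1
      · simp only at hmap
        rw [if_pos (by simpa using hk)] at hmap
        obtain rfl : (0 : Int) + (i : Int) = r := by simpa using hmap
        refine ⟨i, hi, by simp, ?_⟩
        exact (pvGoodGetIff src ks[i] kv.2).mpr
          ⟨hk ▸ (PySem.Dict.get?_eq_some_iff_mem_items src kv.1 kv.2 hs).mpr hkv, by simpa using hb⟩
      · rw [if_neg (by simpa using hk)] at hmap
        cases hmap
  · rintro ⟨i, hi, hfst, hg⟩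
    obtain ⟨hget, hb⟩ := (pvGoodGetIff src ks[i] p.2).mp hg
    refine ⟨(ks[i], p.2), (PySem.Dict.get?_eq_some_iff_mem_items src _ _ hs).mp hget, ?_⟩
    rw [if_neg (by simp [hb])]
    refine List.mem_map.mpr ⟨p.1, ?_, by simp⟩
    unfold pvHits
    refine List.mem_filterMap.mpr ⟨((i : Int), ks[i]), ?_, ?_⟩
    · exact (PySem.List.mem_enumerate_iff ks 0 _).mpr ⟨i, hi, by simp⟩
    · simp [← hfst]

theorem pvCandsFstDet (src : PySem.Dict String String) (ks : List String) (p q : Int × String)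
    (hp : p ∈ pvCands src ks 0) (hq : q ∈ pvCands src ks 0) (hfst : p.1 = q.1) : p = q := by
  rcases (pvMemCandsIff src ks p).mp hp with ⟨i, hi, hip, hgp⟩
  rcases (pvMemCandsIff src ks q).mp hq with ⟨j, hj, hjq, hgq⟩
  have hij : i = j := by
    have : (i : Int) = (j : Int) := by rw [hip, hjq, hfst]
    exact_mod_cast this
  subst hij
  have : p.2 = q.2 := by
    rw [hgp] at hgq; injection hgq
  exact Prod.ext hfst this

theorem pvCandsLB (src : PySem.Dict String String) (ks : List String) (b : Int) :
    ∀ q ∈ pvCands src ks b, b ≤ q.1 := by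
  intro q hq
  unfold pvCands at hq
  rcases List.mem_filterMap.mp hq with ⟨r, hr, hmap⟩
  rcases (PySem.List.mem_enumerate_iff ks b r).mp hr with ⟨i, hi, rfl⟩
  cases hg : pvGoodGet src ks[i] with
  | none => rw [hg] at hmap; cases hmap
  | some v =>
      rw [hg] at hmap
      simp only [Option.map_some, Option.some.injEq] at hmap
      subst hmap
      simp only
      omega

theorem pvExpectMinSpec (src : PySem.Dict String String) (ks : List String) (b : Int) :
    pvMinSpec (pvCands src ks b) (pvExpect src ks b) := by
  induction ks generalizing b with
  | nil => simp [pvExpect, pvCands, PySem.List.enumerate_nil, pvMinSpec]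
  | cons k ks ih =>
      unfold pvExpect pvCands
      rw [PySem.List.enumerate_cons, List.filterMap_cons]
      cases hg : pvGoodGet src k with
      | none =>
          simp only [Option.map_none]
          exact ih (b + 1)
      | some v =>
          simp only [Option.map_some]
          simp only [pvMinSpec]
          constructor
          · exact List.mem_cons_self
          · intro q hq
            rcases List.mem_cons.mp hq with hq | hq
            · simp [hq]
            · exact le_trans (by omega) (pvCandsLB src ks (b + 1) q hq)

theorem pvMinSpecUnique (S S' : List (Int × String)) (o o' : Option (Int × String))
    (h : pvMinSpec S o) (h' : pvMinSpec S' o')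
    (hmem : ∀ p, p ∈ S ↔ p ∈ S')
    (hdet : ∀ p ∈ S', ∀ q ∈ S', p.1 = q.1 → p = q) : o = o' := by
  cases o with
  | none =>
      cases o' with
      | none => rfl
      | some p =>
          simp only [pvMinSpec] at h h'
          exact absurd ((hmem p).mpr h'.1) (by simp [h])
  | some p =>
      cases o' with
      | none =>
          simp only [pvMinSpec] at h h'
          exact absurd ((hmem p).mp h.1) (by simp [h'])
      | some p' =>
          simp only [pvMinSpec] at h h'
          have hp : p ∈ S' := (hmem p).mp h.1
          have hp' : p' ∈ S := (hmem p').mpr h'.1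
          have h1 : p.1 ≤ p'.1 := h.2 p' hp'
          have h2 : p'.1 ≤ p.1 := h'.2 p hp
          exact congrArg some (hdet p hp p' h'.1 (le_antisymm h1 h2))

-- main per-field lemma
theorem pvBestGet (src : PySem.Dict String String) (hs : src.keys.Nodup)
    (e : String × List String) (he : e ∈ pvCANDIDATES) :
    (src.items.foldl (fun best kv =>
        if kv.2 == "" || kv.2 == "0" || kv.2 == "null" || kv.2 == "undefined" then best
        else
          (pvREV.getD kv.1 []).foldl (fun best fr =>
            match best.get? fr.1 with
            | none => best.insert fr.1 (fr.2, kv.2)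
            | some cur => if fr.2 < cur.1 then best.insert fr.1 (fr.2, kv.2) else best) best)
        PySem.Dict.empty).get? e.1
    = pvExpect src e.2 0 := by
  rw [pvProjOuter]
  have hnd : (pvCANDIDATES.map (fun e => e.1)).Nodup := by decide
  have hstep : ∀ (cur : Option (Int × String)) (kv : String × String),
      (pvREV.getD kv.1 []).foldl (fun cur fr => if fr.1 = e.1 then pvUpd cur fr.2 kv.2 else cur) cur
      = (pvHits e.2 kv.1).foldl (fun cur r => pvUpd cur r kv.2) cur := by
    intro cur kv
    rw [PySem.List.foldl_ite_eq_foldl_filter (fun (fr : String × Int) => fr.1 = e.1) (fun (cur : Option (Int × String)) (fr : String × Int) => pvUpd cur fr.2 kv.2)]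
    rw [pvRevGetD, pvFlatMapFilterSingle pvCANDIDATES hnd e he kv.1, List.foldl_map]
  have hfun : (fun (cur : Option (Int × String)) (kv : String × String) =>
      if kv.2 == "" || kv.2 == "0" || kv.2 == "null" || kv.2 == "undefined" then cur
      else (pvREV.getD kv.1 []).foldl (fun cur fr => if fr.1 = e.1 then pvUpd cur fr.2 kv.2 else cur) cur)
      = (fun cur kv =>
      if kv.2 == "" || kv.2 == "0" || kv.2 == "null" || kv.2 == "undefined" then cur
      else (pvHits e.2 kv.1).foldl (fun cur r => pvUpd cur r kv.2) cur) := by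
    funext cur kv
    by_cases hb : (kv.2 == "" || kv.2 == "0" || kv.2 == "null" || kv.2 == "undefined") = true
    · simp [hb]
    · simp only [hb, if_false, Bool.false_eq_true]
      exact hstep cur kv
  rw [PySem.Dict.get?_empty, hfun,
    pvOuterToC (fun v => v == "" || v == "0" || v == "null" || v == "undefined") (fun k => pvHits e.2 k) src.items none]
  have hfold := pvFoldlUpdMinSpec
    (src.items.flatMap (fun kv =>
      if kv.2 == "" || kv.2 == "0" || kv.2 == "null" || kv.2 == "undefined" then []
      else (pvHits e.2 kv.1).map (fun r => (r, kv.2)))) none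
  simp only [Option.toList_none, List.nil_append] at hfold
  have hexp := pvExpectMinSpec src e.2 0
  exact pvMinSpecUnique _ _ _ _ hfold hexp (pvMemCIff src hs e.2) (fun p hp q hq => pvCandsFstDet src e.2 p q hp hq)

-- ===== VERDICT (by name: the statement is the Claim_ definition above) =====
theorem extract_account_spec : Claim_equal_extract_account := by
  intro profile account_raw _
  unfold Spec_extract_account
  have hs : ((PySem.Dict.empty.update profile).update account_raw : PySem.Dict String String).keys.Nodup :=
    PySem.Dict.nodup_keys_update _ _ (PySem.Dict.nodup_keys_update _ _ PySem.Dict.nodup_keys_empty)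
  rw [show extract_account profile account_raw
        = (pvCANDIDATES.map (fun e => (e.1, pvPickA ((PySem.Dict.empty.update profile).update account_raw) e.2))).filterMap
            (fun (p : String × Option String) => p.2.map (fun v => (p.1, v))) from rfl]
  rw [show extract_account_alt profile account_raw
        = (pvCANDIDATES.map (fun e => e.1)).filterMap
            (fun f => ((((PySem.Dict.empty.update profile).update account_raw : PySem.Dict String String).items.foldl
              (fun best kv =>
                if kv.2 == "" || kv.2 == "0" || kv.2 == "null" || kv.2 == "undefined" then best
                else
                  (pvREV.getD kv.1 []).foldl (fun best fr =>
                    match best.get? fr.1 with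
                    | none => best.insert fr.1 (fr.2, kv.2)
                    | some cur => if fr.2 < cur.1 then best.insert fr.1 (fr.2, kv.2) else best) best)
              PySem.Dict.empty).get? f).map (fun p => (f, PySem.Str.strip p.2))) from rfl]
  rw [List.filterMap_map, List.filterMap_map]
  apply List.filterMap_congr
  intro e he
  simp only [Function.comp_apply]
  rw [pvBestGet ((PySem.Dict.empty.update profile).update account_raw) hs e he,
    pvPickA_expect ((PySem.Dict.empty.update profile).update account_raw) e.2 0]
  cases pvExpect ((PySem.Dict.empty.update profile).update account_raw) e.2 0 <;> rfl
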